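-- pv_equiv track=rewrite | github.com/asheorann/bioinformatics_algorithms | 06_Rearragements/6.3_2_Break_Distance_Problem.py | NumberBlocks
-- ===== SOURCE A (Python) =====
-- from typing import List, Dict, Iterable, Tuple
--
-- def NumberBlocks(P: List[List[int]], Q: List[List[int]]):
--     blocks = []
--     for i in range(len(P)):
--         for j in range(len(P[i])):
--             blocks.append(P[i][j])
--     blocks = set(blocks)
--     number = len(blocks)
--     return number
-- ===== SOURCE B (Python) =====
-- def NumberBlocks(P, Q):
--     # distinct count via sort + adjacent-difference scan (no set)
--     flat = []
--     for row in P: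
--         flat.extend(row)
--     flat.sort()
--     count = 0
--     if flat:
--         count = 1
--         for i in range(1, len(flat)):
--             if flat[i] != flat[i - 1]:
--                 count += 1
--     return count
-- ===== Notes on version B (the rewrite author's own statement) =====
-- stated objective: alternative
-- what changed: Counts distinct values by flattening, sorting, and counting adjacent changes in one scan, instead of building a Python set and taking its length.
import Mathlib
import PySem

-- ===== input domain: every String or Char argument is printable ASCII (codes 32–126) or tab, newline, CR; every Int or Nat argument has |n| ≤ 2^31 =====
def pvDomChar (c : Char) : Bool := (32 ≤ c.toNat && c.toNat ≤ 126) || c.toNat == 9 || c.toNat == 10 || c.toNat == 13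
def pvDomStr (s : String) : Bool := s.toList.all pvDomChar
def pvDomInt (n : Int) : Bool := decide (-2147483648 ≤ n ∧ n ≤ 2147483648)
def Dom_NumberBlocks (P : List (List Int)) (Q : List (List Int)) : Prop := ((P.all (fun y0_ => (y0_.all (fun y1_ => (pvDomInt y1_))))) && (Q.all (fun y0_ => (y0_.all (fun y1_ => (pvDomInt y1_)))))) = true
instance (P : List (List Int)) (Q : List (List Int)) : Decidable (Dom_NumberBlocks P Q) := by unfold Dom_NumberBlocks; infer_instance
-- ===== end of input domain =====

-- B counts distinct values by a sort-then-scan over the flattened list instead of a set; return value only.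
-- ===== PORT A =====
def NumberBlocks (P : List (List Int)) (Q : List (List Int)) : Int :=
  -- blocks = []; for i …: for j …: blocks.append(P[i][j])
  let blocks : List Int := P.foldl (fun acc row => row.foldl (fun a x => a ++ [x]) acc) []
  -- blocks = set(blocks); number = len(blocks)
  let blocks' : PySem.Set Int := PySem.Set.ofList blocks
  (blocks'.length : Int)

-- ===== PORT B =====
-- the scan 'for i in range(1, len(flat)): if flat[i] != flat[i-1]: count += 1', as a walk carrying the previous element
def pvCountRuns (prev : Int) : List Int → Int
  | [] => 0
  | x :: xs => (if x ≠ prev then 1 else 0) + pvCountRuns x xs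

def NumberBlocks_alt (P : List (List Int)) (Q : List (List Int)) : Int :=
  let flat : List Int := P.foldl (fun acc row => acc ++ row) []
  let s := PySem.List.sorted flat (fun x => x) false
  match s with
  | [] => 0
  | x :: xs => 1 + pvCountRuns x xs

-- ===== PRECONDITION & SPEC =====
def Spec_NumberBlocks (P : List (List Int)) (Q : List (List Int)) (out : Int) : Prop := out = NumberBlocks_alt P Q
instance (P : List (List Int)) (Q : List (List Int)) (out : Int) : Decidable (Spec_NumberBlocks P Q out) := by unfold Spec_NumberBlocks; infer_instance

-- ===== CLAIM (what is proved, stated in full; the proofs are below) =====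
def Claim_equal_NumberBlocks : Prop := ∀ (P : List (List Int)) (Q : List (List Int)), Dom_NumberBlocks P Q → Spec_NumberBlocks P Q (NumberBlocks P Q)

-- ===== LEMMAS AND PROOFS =====

theorem pvInner (acc : List Int) (row : List Int) :
    row.foldl (fun a x => a ++ [x]) acc = acc ++ row := by
  induction row generalizing acc with
  | nil => simp
  | cons y ys ih => simp [List.foldl, ih]

-- len(set(l)) is the number of distinct elements
theorem pvSetLen (l : List Int) :
    ((PySem.Set.ofList l).length : Int) = (l.toFinset.card : Int) := by
  have hn : (PySem.Set.ofList l).Nodup := PySem.Set.nodup_ofList l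
  have hm : (PySem.Set.ofList l).toFinset = l.toFinset := by
    ext x; simp [List.mem_toFinset, PySem.Set.mem_ofList]
  rw [← List.toFinset_card_of_nodup hn, hm]

-- the scan over a ≤-sorted nonempty list counts its distinct elements
theorem pvScan_sorted (prev : Int) (xs : List Int)
    (h : (prev :: xs).Pairwise (· ≤ ·)) :
    1 + pvCountRuns prev xs = ((prev :: xs).toFinset.card : Int) := by
  induction xs generalizing prev with
  | nil => simp [pvCountRuns]
  | cons y ys ih =>
    have hpy : prev ≤ y := (List.pairwise_cons.1 h).1 y (by simp)
    have htail : (y :: ys).Pairwise (· ≤ ·) := (List.pairwise_cons.1 h).2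
    have hih := ih y htail
    by_cases hxy : y = prev
    · subst hxy
      have : (y :: y :: ys).toFinset = (y :: ys).toFinset := by
        ext z; simp
      rw [pvCountRuns, this]
      simp only [ne_eq, not_true_eq_false, if_false]
      omega
    · have hnotmem : prev ∉ (y :: ys) := by
        intro hmem
        rcases List.mem_cons.1 hmem with h1 | h2
        · exact hxy h1.symm
        · have : y ≤ prev := (List.pairwise_cons.1 htail).1 prev h2
          exact hxy (le_antisymm this hpy)
      have hcard : (prev :: y :: ys).toFinset.card = (y :: ys).toFinset.card + 1 := by
        simp only [List.toFinset_cons]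
        rw [Finset.card_insert_of_notMem (by simpa using hnotmem)]
      rw [pvCountRuns, hcard]
      rw [if_pos hxy] at *
      push_cast
      omega

theorem pvScan_eq_card (l : List Int) :
    (match PySem.List.sorted l (fun x => x) false with
     | [] => (0 : Int)
     | x :: xs => 1 + pvCountRuns x xs) = (l.toFinset.card : Int) := by
  have hperm : (PySem.List.sorted l (fun x => x) false).Perm l := PySem.List.sorted_perm l _ _
  have hfin : (PySem.List.sorted l (fun x => x) false).toFinset = l.toFinset := by
    ext z; simp [List.mem_toFinset, hperm.mem_iff]
  have hpw : (PySem.List.sorted l (fun x => x) false).Pairwise (· ≤ ·) := by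
    simpa using PySem.List.sorted_pairwise l (fun x => x)
  rcases hs : PySem.List.sorted l (fun x => x) false with _ | ⟨x, xs⟩
  · rw [hs] at hfin
    rw [← hfin]; simp
  · rw [hs] at hfin hpw
    rw [← hfin]
    exact pvScan_sorted x xs hpw

-- ===== VERDICT (by name: the statement is the Claim_ definition above) =====
theorem NumberBlocks_spec : Claim_equal_NumberBlocks := by
  intro P Q _
  unfold Spec_NumberBlocks NumberBlocks NumberBlocks_alt
  simp only [pvInner, PySem.List.foldl_append_eq_flatten, List.nil_append]
  rw [pvSetLen, pvScan_eq_card]
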